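-- pv_equiv track=rewrite | github.com/kaskrin13/soybeanIrrigator | evapotranspiration.py | getHighTempFromHTML
-- ===== SOURCE A (Python) =====
-- def getHighTempFromHTML(data):
--     highTemp = data[0][2]
--     index = 0
--
--     # Search new list for highest temp (uses most recent if there are matches)
--     for i in range(0, len(data), 1):
--         if (data[i][2] >= highTemp and i > index):
--             highTemp = data[i][2]
--             index = i
--     return (highTemp, index)
-- ===== SOURCE B (Python) =====
-- def getHighTempFromHTML(data):
--     highTemp = data[0][2]
--     for row in data:
--         if row[2] > highTemp:
--             highTemp = row[2]
--     index = 0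
--     for i in reversed(range(len(data))):
--         if data[i][2] == highTemp:
--             index = i
--             break
--     return (highTemp, index)
-- ===== Notes on version B (the rewrite author's own statement) =====
-- stated objective: alternative
-- what changed: Replaces A's single interleaved scan carrying (highTemp,index) state with two separate passes: a plain max pass over the rows, then a reversed index scan that stops at the first (i.e. most recent) row matching the max.
import Mathlib
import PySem

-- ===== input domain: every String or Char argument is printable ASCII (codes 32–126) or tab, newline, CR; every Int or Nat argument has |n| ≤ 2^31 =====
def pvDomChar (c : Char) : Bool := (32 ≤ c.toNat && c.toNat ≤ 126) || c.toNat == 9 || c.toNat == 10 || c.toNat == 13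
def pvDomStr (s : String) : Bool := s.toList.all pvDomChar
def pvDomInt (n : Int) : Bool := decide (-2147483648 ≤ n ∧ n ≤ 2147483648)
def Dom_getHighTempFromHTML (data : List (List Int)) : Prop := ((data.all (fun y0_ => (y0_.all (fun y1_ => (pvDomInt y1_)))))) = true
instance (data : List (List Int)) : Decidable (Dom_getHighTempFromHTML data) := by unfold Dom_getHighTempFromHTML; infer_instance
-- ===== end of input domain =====

-- B replaces A's single interleaved scan with two separate passes (a plain max pass,
-- then a reversed index scan that stops at the most recent row attaining the max);
-- same O(n) cost, different decomposition.

-- ===== PORT A =====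
def getHighTempFromHTML (data : List (List Int)) : Int × Int :=
  let highTemp : Int := PySem.List.pyGetD (PySem.List.pyGetD data 0 []) 2 0
  (PySem.List.pyRange 0 data.length 1).foldl
    (fun (st : Int × Int) i =>
      if PySem.List.pyGetD (PySem.List.pyGetD data i []) 2 0 ≥ st.1 ∧ i > st.2 then
        (PySem.List.pyGetD (PySem.List.pyGetD data i []) 2 0, i)
      else st)
    (highTemp, 0)

-- ===== PORT B =====
def getHighTempFromHTML_alt (data : List (List Int)) : Int × Int :=
  let highTemp : Int :=
    data.foldl (fun h row => if PySem.List.pyGetD row 2 0 > h then PySem.List.pyGetD row 2 0 else h)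
      (PySem.List.pyGetD (PySem.List.pyGetD data 0 []) 2 0)
  let index : Int :=
    match (List.range data.length).reverse.find?
        (fun (i : Nat) => PySem.List.pyGetD (PySem.List.pyGetD data (i : Int) []) 2 0 == highTemp) with
    | some i => (i : Int)
    | none => 0
  (highTemp, index)

-- ===== PRECONDITION & SPEC =====
-- Pre_ excludes exactly the inputs where the Python A raises IndexError: empty data
-- (data[0] fails) or a row with fewer than 3 entries (row[2] fails).
def Pre_getHighTempFromHTML (data : List (List Int)) : Prop :=
  data ≠ [] ∧ ∀ row ∈ data, 3 ≤ row.length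
instance (data : List (List Int)) : Decidable (Pre_getHighTempFromHTML data) := by
  unfold Pre_getHighTempFromHTML; infer_instance
def pvWitness_getHighTempFromHTML : List (List Int) := [[1, 2, 3], [4, 5, 6], [7, 8, 3]]

def Spec_getHighTempFromHTML (data : List (List Int)) (out : Int × Int) : Prop := out = getHighTempFromHTML_alt data
instance (data : List (List Int)) (out : Int × Int) : Decidable (Spec_getHighTempFromHTML data out) := by unfold Spec_getHighTempFromHTML; infer_instance

-- ===== CLAIM (what is proved, stated in full; the proofs are below) =====
def Claim_equal_getHighTempFromHTML : Prop := ∀ (data : List (List Int)), Dom_getHighTempFromHTML data → Pre_getHighTempFromHTML data → Spec_getHighTempFromHTML data (getHighTempFromHTML data)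

-- ===== LEMMAS AND PROOFS =====

-- abstract versions over the list of third-column values
def pvVal (row : List Int) : Int := PySem.List.pyGetD row 2 0

def pvStep (vals : List Int) (st : Int × Int) (k : Nat) : Int × Int :=
  if vals.getD k 0 ≥ st.1 ∧ (k : Int) > st.2 then (vals.getD k 0, (k : Int)) else st

def pvFoldA (vals : List Int) : Int × Int :=
  (List.range vals.length).foldl (pvStep vals) (vals.getD 0 0, 0)

def pvMaxB (vals : List Int) : Int :=
  vals.foldl (fun h v => if v > h then v else h) (vals.getD 0 0)

def pvIdxB (vals : List Int) : Nat :=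
  ((List.range vals.length).reverse.find? (fun i => vals.getD i 0 == pvMaxB vals)).getD 0

lemma pvFind?_congr {α : Type} (l : List α) (p q : α → Bool)
    (h : ∀ x ∈ l, p x = q x) : l.find? p = l.find? q := by
  induction l with
  | nil => rfl
  | cons a l ih =>
    simp only [List.find?]
    rw [h a (by simp)]
    cases q a with
    | true => rfl
    | false => exact ih (fun x hx => h x (by simp [hx]))

lemma pvIdxB_lt (vals : List Int) (h : vals ≠ []) : pvIdxB vals < vals.length := by
  unfold pvIdxB
  cases hf : (List.range vals.length).reverse.find?
      (fun i => vals.getD i 0 == pvMaxB vals) with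
  | none => simpa [List.length_pos_iff] using h
  | some i =>
    have := List.mem_of_find?_eq_some hf
    simp only [List.mem_reverse, List.mem_range] at this
    simpa using this

lemma pvCore (vals : List Int) (h : vals ≠ []) :
    pvFoldA vals = (pvMaxB vals, ((pvIdxB vals : Nat) : Int)) := by
  induction vals using List.reverseRecOn with
  | nil => exact absurd rfl h
  | append_singleton l x ih =>
    by_cases hl : l = []
    · subst hl
      simp [pvFoldA, pvMaxB, pvIdxB, pvStep, List.range_succ]
    · have hlen : 0 < l.length := List.length_pos_iff.mpr hl
      have hget0 : (l ++ [x]).getD 0 0 = l.getD 0 0 := by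
        rw [List.getD_eq_getElem?_getD, List.getD_eq_getElem?_getD,
            List.getElem?_append_left hlen]
      have hgetk : ∀ k < l.length, (l ++ [x]).getD k 0 = l.getD k 0 := by
        intro k hk
        rw [List.getD_eq_getElem?_getD, List.getD_eq_getElem?_getD,
            List.getElem?_append_left hk]
      have hgetn : (l ++ [x]).getD l.length 0 = x := by
        rw [List.getD_eq_getElem?_getD]; simp
      -- A side: the fold over range (n+1) is one step on top of the fold for l
      have hA : pvFoldA (l ++ [x]) = pvStep (l ++ [x]) (pvFoldA l) l.length := by
        unfold pvFoldA
        rw [show (l ++ [x]).length = l.length + 1 by simp, List.range_succ,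
            List.foldl_append, hget0,
            PySem.List.foldl_congr_mem (List.range l.length) (pvStep (l ++ [x])) (pvStep l)
              (l.getD 0 0, 0)
              (by intro st k hk
                  simp only [List.mem_range] at hk
                  simp only [pvStep, List.getD_eq_getElem?_getD,
                    List.getElem?_append_left hk])]
        rfl
      have hM : pvMaxB (l ++ [x]) = if x > pvMaxB l then x else pvMaxB l := by
        unfold pvMaxB
        rw [List.foldl_append, hget0]
        rfl
      have hfind_congr : (List.range l.length).reverse.find?
            (fun i => (l ++ [x]).getD i 0 == pvMaxB l)
          = (List.range l.length).reverse.find? (fun i => l.getD i 0 == pvMaxB l) := by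
        apply pvFind?_congr
        intro k hk
        simp only [List.mem_reverse, List.mem_range] at hk
        rw [hgetk k hk]
      have hidx_lt : ((pvIdxB l : Nat) : Int) < (l.length : Int) := by
        exact_mod_cast pvIdxB_lt l hl
      rw [hA, ih hl]
      unfold pvStep
      rw [hgetn]
      by_cases hx : x ≥ pvMaxB l
      · have hMx : pvMaxB (l ++ [x]) = x := by
          rw [hM]; split_ifs with hgt <;> omega
        have hI : pvIdxB (l ++ [x]) = l.length := by
          unfold pvIdxB
          rw [show (l ++ [x]).length = l.length + 1 by simp, List.range_succ,
              List.reverse_append, hMx]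
          simp [List.find?_cons_of_pos]
        simp [hx, hidx_lt, hMx, hI]
      · have hMx : pvMaxB (l ++ [x]) = pvMaxB l := by
          rw [hM]; split_ifs with hgt <;> omega
        have hI : pvIdxB (l ++ [x]) = pvIdxB l := by
          unfold pvIdxB
          rw [show (l ++ [x]).length = l.length + 1 by simp, List.range_succ,
              List.reverse_append, hMx]
          have : ([l.length].reverse ++ (List.range l.length).reverse)
              = l.length :: (List.range l.length).reverse := by simp
          rw [this, List.find?_cons_of_neg (by rw [hgetn]; simp; omega), hfind_congr]
        rw [hMx, hI, if_neg (by intro hc; exact hx hc.1)]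

-- bridge: both ports compute the abstract functions on vals = data.map pvVal
lemma pvGetD_map (data : List (List Int)) (k : Nat) (hk : k < data.length) :
    pvVal (data.getD k []) = (data.map pvVal).getD k 0 := by
  rw [List.getD_eq_getElem?_getD, List.getD_eq_getElem?_getD,
      List.getElem?_map, List.getElem?_eq_getElem hk]
  simp

lemma pvBridgeA (data : List (List Int)) (h : data ≠ []) :
    getHighTempFromHTML data = pvFoldA (data.map pvVal) := by
  unfold getHighTempFromHTML pvFoldA
  rw [PySem.List.pyRange_one]
  simp only [List.foldl_map]
  have hlt : 0 < data.length := List.length_pos_iff.mpr h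
  have hlen : (data.map pvVal).length = data.length := by simp
  rw [hlen, show ((data.length : Int) - 0).toNat = data.length by omega]
  rw [PySem.List.foldl_congr_mem (List.range data.length) _ (pvStep (data.map pvVal)) _
      (by intro st k hk
          simp only [List.mem_range] at hk
          have h1 : PySem.List.pyGetD data ((k : Nat) : Int) [] = data.getD k [] := by
            simp [PySem.List.pyGetD_natCast]
          simp only [zero_add, h1, pvStep, ← pvGetD_map data k hk, pvVal])]
  have h0 : PySem.List.pyGetD data 0 [] = data.getD 0 [] := PySem.List.pyGetD_zero data []
  rw [h0, show PySem.List.pyGetD (data.getD 0 []) 2 0 = pvVal (data.getD 0 []) from rfl,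
      pvGetD_map data 0 hlt]

lemma pvBridgeB (data : List (List Int)) (h : data ≠ []) :
    getHighTempFromHTML_alt data
      = (pvMaxB (data.map pvVal), ((pvIdxB (data.map pvVal) : Nat) : Int)) := by
  have hlt : 0 < data.length := List.length_pos_iff.mpr h
  have h0 : PySem.List.pyGetD data 0 [] = data.getD 0 [] := PySem.List.pyGetD_zero data []
  have hlen : (data.map pvVal).length = data.length := by simp
  have hmax : data.foldl
      (fun h row => if PySem.List.pyGetD row 2 0 > h then PySem.List.pyGetD row 2 0 else h)
      (PySem.List.pyGetD (PySem.List.pyGetD data 0 []) 2 0) = pvMaxB (data.map pvVal) := by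
    unfold pvMaxB
    rw [List.foldl_map, h0,
        show PySem.List.pyGetD (data.getD 0 []) 2 0 = pvVal (data.getD 0 []) from rfl,
        pvGetD_map data 0 hlt]
    rfl
  have hfind : (List.range data.length).reverse.find?
        (fun (i : Nat) =>
          PySem.List.pyGetD (PySem.List.pyGetD data (i : Int) []) 2 0 == pvMaxB (data.map pvVal))
      = (List.range (data.map pvVal).length).reverse.find?
        (fun i => (data.map pvVal).getD i 0 == pvMaxB (data.map pvVal)) := by
    rw [hlen]
    apply pvFind?_congr
    intro k hk
    simp only [List.mem_reverse, List.mem_range] at hk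
    have h1 : PySem.List.pyGetD data ((k : Nat) : Int) [] = data.getD k [] := by
      simp [PySem.List.pyGetD_natCast]
    rw [h1, show PySem.List.pyGetD (data.getD k []) 2 0 = pvVal (data.getD k []) from rfl,
        pvGetD_map data k hk]
  unfold getHighTempFromHTML_alt
  simp only [hmax, hfind]
  unfold pvIdxB
  cases (List.range (data.map pvVal).length).reverse.find?
      (fun i => (data.map pvVal).getD i 0 == pvMaxB (data.map pvVal)) <;> simp

-- ===== VERDICT (by name: the statement is the Claim_ definition above) =====
theorem getHighTempFromHTML_spec : Claim_equal_getHighTempFromHTML := by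
  intro data _ hpre
  have hne : data ≠ [] := hpre.1
  have hvne : data.map pvVal ≠ [] := by simpa using hne
  unfold Spec_getHighTempFromHTML
  rw [pvBridgeA data hne, pvBridgeB data hne, pvCore (data.map pvVal) hvne]
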